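-- pv_equiv track=rewrite | github.com/josephgshamoon/trading-bot | src/backtest.py | calc_running_max
-- ===== SOURCE A (Python) =====
-- def calc_running_max(values):
--     """Calculate running maximum"""
--     result = []
--     current = 0
--     for v in values:
--         if v > current:
--             current = v
--         result.append(current)
--     return result
-- ===== SOURCE B (Python) =====
-- def calc_running_max(values):
--     """Calculate running maximum"""
--     # pass 1: plain prefix maxima
--     prefixes = []
--     for v in values:
--         prefixes.append(v if not prefixes or v > prefixes[-1] else prefixes[-1])
--     # pass 2: floor at zero
--     return [x if x > 0 else 0 for x in prefixes]
-- ===== Notes on version B (the rewrite author's own statement) =====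
-- stated objective: alternative
-- what changed: A's single fused loop (running max seeded at 0) is split into two separate passes: first the plain prefix maxima of values are materialised, then a second clamping pass floors each at zero.
import Mathlib
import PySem

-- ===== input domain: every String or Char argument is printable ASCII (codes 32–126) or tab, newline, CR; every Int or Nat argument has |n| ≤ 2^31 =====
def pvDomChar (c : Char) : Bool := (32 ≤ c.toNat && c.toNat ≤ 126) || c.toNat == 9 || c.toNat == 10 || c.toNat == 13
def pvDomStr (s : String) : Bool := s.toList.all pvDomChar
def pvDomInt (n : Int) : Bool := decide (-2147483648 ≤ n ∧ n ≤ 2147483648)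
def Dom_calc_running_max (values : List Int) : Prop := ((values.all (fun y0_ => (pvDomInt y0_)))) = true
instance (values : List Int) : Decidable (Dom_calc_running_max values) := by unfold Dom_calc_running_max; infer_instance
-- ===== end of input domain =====

-- B splits A's fused running-max-floored-at-zero loop into two separate passes (plain prefix maxima, then clamp at zero); alternative decomposition, same cost.


-- ===== PORT A =====
def calc_running_max (values : List Int) : List Int :=
  (values.foldl (fun (st : List Int × Int) v =>
      let current := if v > st.2 then v else st.2
      (st.1 ++ [current], current)) (([] : List Int), (0 : Int))).1

-- ===== PORT B =====
-- pass 1: plain prefix maxima (prefixes[-1] under the nonempty guard = getLast?)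
def calc_running_max_alt (values : List Int) : List Int :=
  let prefixes := values.foldl (fun (acc : List Int) v =>
      acc ++ [match acc.getLast? with
              | none => v
              | some m => if v > m then v else m]) ([] : List Int)
  prefixes.map (fun x => if x > 0 then x else 0)

-- ===== PRECONDITION & SPEC =====
def Spec_calc_running_max (values : List Int) (out : List Int) : Prop := out = calc_running_max_alt values
instance (values : List Int) (out : List Int) : Decidable (Spec_calc_running_max values out) := by unfold Spec_calc_running_max; infer_instance

-- ===== CLAIM (what is proved, stated in full; the proofs are below) =====
def Claim_equal_calc_running_max : Prop := ∀ (values : List Int), Dom_calc_running_max values → Spec_calc_running_max values (calc_running_max values)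

-- ===== LEMMAS AND PROOFS =====

-- the common running-step recursion
def pvRun (c : Int) : List Int → List Int
  | [] => []
  | v :: vs => let c' := if v > c then v else c; c' :: pvRun c' vs

theorem pvA_fold (vs : List Int) : ∀ (r : List Int) (c : Int),
    (vs.foldl (fun (st : List Int × Int) v =>
      let current := if v > st.2 then v else st.2
      (st.1 ++ [current], current)) (r, c)).1 = r ++ pvRun c vs := by
  induction vs with
  | nil => intro r c; simp [pvRun]
  | cons v vs ih => intro r c; simp [pvRun, ih]

theorem pvB_fold (vs : List Int) : ∀ (acc : List Int) (m : Int), acc.getLast? = some m →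
    (vs.foldl (fun (acc : List Int) v =>
      acc ++ [match acc.getLast? with
              | none => v
              | some m => if v > m then v else m]) acc) = acc ++ pvRun m vs := by
  induction vs with
  | nil => intro acc m _; simp [pvRun]
  | cons v vs ih =>
    intro acc m h
    simp only [List.foldl_cons, h, pvRun]
    rw [ih (acc ++ [if v > m then v else m]) (if v > m then v else m) (by simp)]
    simp

theorem pvClamp_run (vs : List Int) : ∀ (c : Int),
    (pvRun c vs).map (fun x => if x > 0 then x else 0) = pvRun (if c > 0 then c else 0) vs := by
  induction vs with
  | nil => intro c; simp [pvRun]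
  | cons v vs ih =>
    intro c
    simp only [pvRun, List.map_cons, ih]
    have h : (if (if v > c then v else c) > 0 then (if v > c then v else c) else 0)
        = (if v > (if c > 0 then c else 0) then v else (if c > 0 then c else 0)) := by
      split_ifs <;> omega
    rw [h]

-- ===== VERDICT (by name: the statement is the Claim_ definition above) =====
theorem calc_running_max_spec : Claim_equal_calc_running_max := by
  intro values _
  unfold Spec_calc_running_max calc_running_max calc_running_max_alt
  cases values with
  | nil => simp
  | cons v vs =>
    rw [pvA_fold]
    simp only [List.foldl_cons, List.getLast?_nil, List.nil_append]
    rw [pvB_fold vs [v] v (by simp)]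
    simp only [pvRun, List.singleton_append, List.map_cons, pvClamp_run]
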